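-- pv_equiv track=rewrite | github.com/Timonvdm/adventofcode2024 | day9/main.py | find_empty_space_by_size
-- ===== SOURCE A (Python) =====
-- def find_empty_space_by_size(blocks, size):
--     empty_space_pos = []
--     found = False
--     for i, x in enumerate(blocks):
--         if x == '.':
--             empty_space_pos.append(i)
--         else:
--             empty_space_pos.clear()
--
--         #Found it, get to the chopper!!!
--         if len(empty_space_pos) == size:
--             found = True
--             break
--
--     return empty_space_pos if found else []
-- ===== SOURCE B (Python) =====
-- def find_empty_space_by_size(blocks, size):
--     if size <= 0:
--         return []
--     for i in range(len(blocks) - size + 1):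
--         if all(b == '.' for b in blocks[i:i + size]):
--             return list(range(i, i + size))
--     return []
-- ===== Notes on version B (the rewrite author's own statement) =====
-- stated objective: alternative
-- what changed: Replaced the single-pass run accumulator (append/clear list with a found flag) by a nested sliding-window search: scan each start index and test whether the whole window is '.', returning range(i, i+size) at the first hit.
import Mathlib
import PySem

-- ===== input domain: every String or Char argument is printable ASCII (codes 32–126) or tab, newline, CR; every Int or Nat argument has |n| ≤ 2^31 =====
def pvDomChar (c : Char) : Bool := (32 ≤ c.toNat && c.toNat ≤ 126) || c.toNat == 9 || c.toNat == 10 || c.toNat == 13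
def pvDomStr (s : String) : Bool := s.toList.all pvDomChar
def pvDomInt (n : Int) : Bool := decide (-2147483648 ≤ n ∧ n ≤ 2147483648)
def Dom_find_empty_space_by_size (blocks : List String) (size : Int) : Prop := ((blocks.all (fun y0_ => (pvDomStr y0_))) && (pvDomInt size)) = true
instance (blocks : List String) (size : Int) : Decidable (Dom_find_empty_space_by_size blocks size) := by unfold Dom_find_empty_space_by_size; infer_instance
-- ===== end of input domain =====

-- B replaces A's single-pass run accumulator by a sliding-window search over start indices;
-- same return value on all inputs (alternative decomposition, no speed claim).


-- ===== PORT A =====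
-- the `for i, x in enumerate(blocks)` loop with `break`: structural recursion over the
-- remaining list, carrying the running index `idx` and the accumulator `empty_space_pos`;
-- `break` followed by `return empty_space_pos if found else []` becomes returning `pos'`
-- at the spot the break fires, and `[]` when the list is exhausted (found = False).
def goA (size : Int) (l : List String) (idx : Nat) (pos : List Int) : List Int :=
  match l with
  | [] => []
  | x :: rest =>
    let pos' := if x == "." then pos ++ [(idx : Int)] else []
    if (pos'.length : Int) = size then pos' else goA size rest (idx + 1) pos'

def find_empty_space_by_size (blocks : List String) (size : Int) : List Int :=
  goA size blocks 0 []

-- ===== PORT B =====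
-- the `for i in range(len(blocks) - size + 1)` loop with early `return`: recursion on the
-- number of remaining start indices (`fuel = len(blocks) - size + 1`, clamped at 0 like an
-- empty Python range), `blocks[i:i+size]` via PySem.List.slice, `list(range(i, i+size))`
-- via PySem.List.pyRange (exact for these non-negative bounds).
def goB (blocks : List String) (size : Int) (i : Nat) (fuel : Nat) : List Int :=
  match fuel with
  | 0 => []
  | f + 1 =>
    if (PySem.List.slice blocks (some (i : Int)) (some ((i : Int) + size))).all (fun b => b == ".") then
      PySem.List.pyRange (i : Int) ((i : Int) + size) 1
    else goB blocks size (i + 1) f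

def find_empty_space_by_size_alt (blocks : List String) (size : Int) : List Int :=
  if size ≤ 0 then []
  else goB blocks size 0 (blocks.length + 1 - size.toNat)

-- ===== PRECONDITION & SPEC =====
def Spec_find_empty_space_by_size (blocks : List String) (size : Int) (out : List Int) : Prop := out = find_empty_space_by_size_alt blocks size
instance (blocks : List String) (size : Int) (out : List Int) : Decidable (Spec_find_empty_space_by_size blocks size out) := by unfold Spec_find_empty_space_by_size; infer_instance

-- ===== CLAIM (what is proved, stated in full; the proofs are below) =====
def Claim_equal_find_empty_space_by_size : Prop := ∀ (blocks : List String) (size : Int), Dom_find_empty_space_by_size blocks size → Spec_find_empty_space_by_size blocks size (find_empty_space_by_size blocks size)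

-- ===== LEMMAS AND PROOFS =====

-- For size ≤ 0, A's success branch can only return [] (length 0 = size forces pos' = []).
theorem goA_nonpos (size : Int) (h : size ≤ 0) :
    ∀ (l : List String) (idx : Nat) (pos : List Int), goA size l idx pos = [] := by
  intro l
  induction l with
  | nil => intro idx pos; simp [goA]
  | cons x rest ih =>
    intro idx pos
    simp only [goA]
    split
    · split
      · rename_i heq
        exfalso
        simp [List.length_append] at heq
        omega
      · exact ih _ _
    · split
      · rfl
      · exact ih _ _

-- B skips any block of failing windows one step at a time.
theorem goB_skip (blocks : List String) (size : Int) :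
    ∀ (m i fuel : Nat),
      (∀ t, i ≤ t → t < i + m →
        (PySem.List.slice blocks (some (t : Int)) (some ((t : Int) + size))).all (fun b => b == ".") = false) →
      goB blocks size i fuel = goB blocks size (i + m) (fuel - m) := by
  intro m
  induction m with
  | zero => intro i fuel _; simp
  | succ m ih =>
    intro i fuel hfail
    match fuel with
    | 0 => simp [goB]
    | f + 1 =>
      have h0 := hfail i (le_refl _) (by omega)
      simp only [goB, h0, Bool.false_eq_true, if_false]
      have := ih (i + 1) f (fun t ht1 ht2 => hfail t (by omega) (by omega))
      rw [this]
      congr 1 <;> omega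

-- elements of a slice of blocks, read back as getElem
theorem slice_mem (blocks : List String) (i s : Nat) (b : String)
    (hb : b ∈ PySem.List.slice blocks (some (i : Int)) (some ((i : Int) + (s : Int)))) :
    ∃ j, j < s ∧ i + j < blocks.length ∧ blocks[i + j]! = b := by
  rw [PySem.List.slice_natCast_add] at hb
  rw [List.mem_iff_getElem] at hb
  obtain ⟨j, hj, hjb⟩ := hb
  have hjlen : j < s ∧ i + j < blocks.length := by
    have h1 := hj
    simp [List.length_take, List.length_drop] at h1
    omega
  refine ⟨j, hjlen.1, hjlen.2, ?_⟩
  rw [List.getElem_take, List.getElem_drop] at hjb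
  rw [getElem!_pos blocks (i + j) hjlen.2]
  exact hjb

-- a failing position inside a window falsifies the window test
theorem slice_all_false (blocks : List String) (i s t : Nat)
    (hts : t < s) (htl : i + t < blocks.length) (hne : blocks[i + t]! ≠ ".") :
    (PySem.List.slice blocks (some (i : Int)) (some ((i : Int) + (s : Int)))).all (fun b => b == ".") = false := by
  rw [PySem.List.slice_natCast_add]
  rw [List.all_eq_false]
  refine ⟨blocks[i + t]!, ?_, by simpa using hne⟩
  rw [List.mem_iff_getElem]
  refine ⟨t, by simp [List.length_take, List.length_drop]; omega, ?_⟩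
  rw [List.getElem_take, List.getElem_drop, getElem!_pos blocks (i + t) htl]

-- an all-dots window makes the window test true
theorem slice_all_true (blocks : List String) (i s : Nat)
    (hall : ∀ j, j < s → i + j < blocks.length → blocks[i + j]! = ".") :
    (PySem.List.slice blocks (some (i : Int)) (some ((i : Int) + (s : Int)))).all (fun b => b == ".") = true := by
  rw [List.all_eq_true]
  intro b hb
  obtain ⟨j, hj, hjl, hjb⟩ := slice_mem blocks i s b hb
  simp [← hjb, hall j hj hjl]

-- the run accumulator A carries, written in closed form
def posOf (idx c : Nat) : List Int := (List.range c).map (fun k => ((idx - c + k : Nat) : Int))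

theorem posOf_zero (idx : Nat) : posOf idx 0 = [] := by simp [posOf]

theorem posOf_snoc (idx c : Nat) (hc : c ≤ idx) :
    posOf idx c ++ [(idx : Int)] = posOf (idx + 1) (c + 1) := by
  simp only [posOf, List.range_succ, List.map_append, List.map_cons, List.map_nil]
  congr 1
  · apply List.map_congr_left
    intro k hk
    rw [List.mem_range] at hk
    congr 1
    omega
  · congr 2
    omega

-- Main invariant: A's scan from index idx with a run of c dots just behind it computes
-- the same result as B's window search restarted at the run's start idx - c.
theorem goA_goB (blocks : List String) (size : Int) (s : Nat)
    (hs : size = (s : Int)) (hs1 : 1 ≤ s) :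
    ∀ (l : List String) (idx c : Nat),
      l = blocks.drop idx → idx ≤ blocks.length → c ≤ idx → c < s →
      (∀ k, idx - c ≤ k → k < idx → blocks[k]! = ".") →
      goA size l idx (posOf idx c)
        = goB blocks size (idx - c) (blocks.length + 1 - s - (idx - c)) := by
  intro l
  induction l with
  | nil =>
    intro idx c hl hidx hc hcs hdots
    have hlen : blocks.length ≤ idx := by
      have := congrArg List.length hl
      simp [List.length_drop] at this
      omega
    have : blocks.length + 1 - s - (idx - c) = 0 := by omega
    rw [this]
    simp [goA, goB]
  | cons x rest ih =>
    intro idx c hl hidx hc hcs hdots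
    have hidxlt : idx < blocks.length := by
      by_contra h
      rw [List.drop_eq_nil_of_le (by omega)] at hl
      exact List.cons_ne_nil _ _ hl
    have hx : blocks[idx]! = x := by
      have h0 : (blocks.drop idx)[0]'(by rw [← hl]; simp) = x := by
        simp [← hl]
      rw [List.getElem_drop] at h0
      rw [getElem!_pos blocks idx hidxlt]
      simpa using h0
    have hrest : rest = blocks.drop (idx + 1) := by
      have h2 : (blocks.drop idx).drop 1 = blocks.drop (idx + 1) := List.drop_drop ..
      rw [← hl] at h2
      simpa using h2
    by_cases hdot : x = "."
    · -- dot: run extends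
      have hsn : (x == ".") = true := by simp [hdot]
      simp only [goA, hsn, reduceIte, posOf_snoc idx c hc]
      have hlen' : (posOf (idx + 1) (c + 1)).length = c + 1 := by
        simp [posOf]
      by_cases hfound : c + 1 = s
      · -- run complete: A returns it; B's window at idx - c succeeds
        rw [if_pos (by rw [hlen', hs]; exact_mod_cast hfound)]
        have hfuel : 1 ≤ blocks.length + 1 - s - (idx - c) := by omega
        obtain ⟨f, hf⟩ : ∃ f, blocks.length + 1 - s - (idx - c) = f + 1 :=
          ⟨blocks.length + 1 - s - (idx - c) - 1, by omega⟩
        rw [hf]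
        have hwin : (PySem.List.slice blocks (some ((idx - c : Nat) : Int))
            (some (((idx - c : Nat) : Int) + size))).all (fun b => b == ".") = true := by
          rw [hs]
          apply slice_all_true
          intro j hj _
          by_cases hjc : j < c
          · exact hdots (idx - c + j) (by omega) (by omega)
          · have : idx - c + j = idx := by omega
            rw [this, hx, hdot]
        simp only [goB, hwin, if_true]
        rw [hs, PySem.List.pyRange_one]
        have : ((((idx - c : Nat) : Int) + (s : Int)) - ((idx - c : Nat) : Int)).toNat = s := by
          omega
        rw [this]
        simp only [posOf]
        subst hfound
        apply List.map_congr_left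
        intro k hk
        rw [List.mem_range] at hk
        push_cast
        omega
      · -- run not complete: continue, frontier i = idx - c unchanged
        rw [if_neg (by rw [hlen', hs]; intro h; exact hfound (by exact_mod_cast h))]
        have := ih (idx + 1) (c + 1) hrest (by omega) (by omega) (by omega)
          (fun k hk1 hk2 => by
            by_cases hkidx : k < idx
            · exact hdots k (by omega) hkidx
            · have : k = idx := by omega
              rw [this, hx, hdot])
        rw [this]
        congr 1 <;> omega
    · -- non-dot: run resets; B skips the c+1 windows containing idx, all failing
      have hsn : (x == ".") = false := by simp [hdot]
      simp only [goA, hsn, Bool.false_eq_true, reduceIte, List.length_nil]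
      rw [if_neg (by rw [hs]; intro h; omega)]
      have := ih (idx + 1) 0 hrest (by omega) (by omega) (by omega) (fun k hk1 hk2 => by omega)
      rw [posOf_zero] at this
      rw [this]
      rw [goB_skip blocks size (c + 1) (idx - c) (blocks.length + 1 - s - (idx - c))
        (fun t ht1 ht2 => by
          rw [hs]
          apply slice_all_false blocks t s (idx - t) (by omega) (by omega)
          rw [show t + (idx - t) = idx by omega, hx]
          exact hdot)]
      congr 1 <;> omega

-- ===== VERDICT (by name: the statement is the Claim_ definition above) =====
theorem find_empty_space_by_size_spec : Claim_equal_find_empty_space_by_size := by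
  intro blocks size _
  unfold Spec_find_empty_space_by_size find_empty_space_by_size find_empty_space_by_size_alt
  by_cases hnp : size ≤ 0
  · rw [if_pos hnp, goA_nonpos size hnp]
  · rw [if_neg hnp]
    have hs1 : 1 ≤ size.toNat := by omega
    have hs : size = (size.toNat : Int) := by omega
    have := goA_goB blocks size size.toNat hs hs1 blocks 0 0 (by simp) (by omega) (by omega)
      (by omega) (fun k hk1 hk2 => by omega)
    rw [posOf_zero] at this
    rw [this]
    congr 1
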